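-- pv_equiv track=rewrite | github.com/NemanjaZivanovic/master-rad | VanRooijBodlaenderAlgorithm.py | convert_msc_to_mds_solution
-- ===== SOURCE A (Python) =====
-- def convert_msc_to_mds_solution(multiset, msc_result):
--   mds_solution_indexes = []
--
--   for i in range(len(msc_result)):
--     for j in range(len(multiset)):
--       if msc_result[i] & multiset[j] == msc_result[i]:
--           mds_solution_indexes.append(j)
--           break
--
--   mds_solution_indexes.sort()
--   mds_solution = 0
--   for i in mds_solution_indexes:
--     mds_solution |= (1 << (len(multiset) - i - 1))
--
--   return mds_solution
-- ===== SOURCE B (Python) =====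
-- def convert_msc_to_mds_solution(multiset, msc_result):
--   # Inverted traversal: walk the multiset once, keeping the list of masks not
--   # yet covered; a bit is set when position j is the first superset of some
--   # remaining mask.  No per-mask index scan, no index list, no sort.
--   n = len(multiset)
--   remaining = list(msc_result)
--   mds_solution = 0
--   for j, m in enumerate(multiset):
--     unmatched = [x for x in remaining if x & m != x]
--     if len(unmatched) != len(remaining):
--       mds_solution |= 1 << (n - j - 1)
--     remaining = unmatched
--   return mds_solution
-- ===== Notes on version B (the rewrite author's own statement) =====
-- stated objective: alternative
-- what changed: B inverts the loops: instead of scanning the multiset for each mask, collecting indices, sorting and OR-folding them, it walks the multiset once while progressively filtering out the masks already covered, setting a bit the moment a position first covers some remaining mask; the index list and the sort disappear.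
import Mathlib
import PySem

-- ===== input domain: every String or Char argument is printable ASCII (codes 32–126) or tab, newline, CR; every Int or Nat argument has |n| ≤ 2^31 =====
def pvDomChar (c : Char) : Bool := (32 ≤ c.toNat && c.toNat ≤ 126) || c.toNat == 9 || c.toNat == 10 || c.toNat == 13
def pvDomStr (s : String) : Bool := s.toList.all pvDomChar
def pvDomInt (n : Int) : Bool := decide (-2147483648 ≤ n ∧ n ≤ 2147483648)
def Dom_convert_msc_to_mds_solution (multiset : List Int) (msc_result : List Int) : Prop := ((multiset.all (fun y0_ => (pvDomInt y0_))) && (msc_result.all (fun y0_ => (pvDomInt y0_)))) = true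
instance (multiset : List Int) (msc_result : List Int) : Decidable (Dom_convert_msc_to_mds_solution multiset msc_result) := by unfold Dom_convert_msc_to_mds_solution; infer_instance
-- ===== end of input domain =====

-- B inverts A's traversal: one pass over the multiset, progressively filtering the list of
-- not-yet-covered masks; A's per-mask index scan, index list and sort are gone (alternative).

-- ===== PORT A =====
-- inner 'for j in range(len(multiset)): if … : append(j); break' — first j with x & multiset[j] == x
def pvFindIdx (x : Int) (j : Nat) : List Int → Option Nat
  | [] => none
  | m :: ms => if PySem.Int.band x m = x then some j else pvFindIdx x (j + 1) ms

def convert_msc_to_mds_solution (multiset : List Int) (msc_result : List Int) : Int :=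
  let idxs := msc_result.foldl (fun acc x =>
      match pvFindIdx x 0 multiset with
      | some j => acc ++ [j]
      | none => acc) ([] : List Nat)
  let idxsSorted := PySem.List.sorted idxs (fun j => j) false
  idxsSorted.foldl (fun acc j => PySem.Int.bor acc ((1 : Int) <<< (multiset.length - j - 1))) 0

-- ===== PORT B =====
-- Source B's loop 'for j, m in enumerate(multiset): unmatched = [x for x in remaining if x & m != x]; …'
def pvScan (n : Nat) (j : Nat) (remaining : List Int) (acc : Int) : List Int → Int
  | [] => acc
  | m :: ms =>
    let unmatched := remaining.filter (fun x => decide (PySem.Int.band x m ≠ x))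
    let acc' := if unmatched.length ≠ remaining.length then PySem.Int.bor acc ((1 : Int) <<< (n - j - 1)) else acc
    pvScan n (j + 1) unmatched acc' ms

def convert_msc_to_mds_solution_alt (multiset : List Int) (msc_result : List Int) : Int :=
  pvScan multiset.length 0 msc_result 0 multiset

-- ===== PRECONDITION & SPEC =====
def Spec_convert_msc_to_mds_solution (multiset : List Int) (msc_result : List Int) (out : Int) : Prop := out = convert_msc_to_mds_solution_alt multiset msc_result
instance (multiset : List Int) (msc_result : List Int) (out : Int) : Decidable (Spec_convert_msc_to_mds_solution multiset msc_result out) := by unfold Spec_convert_msc_to_mds_solution; infer_instance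

-- ===== CLAIM (what is proved, stated in full; the proofs are below) =====
def Claim_equal_convert_msc_to_mds_solution : Prop := ∀ (multiset : List Int) (msc_result : List Int), Dom_convert_msc_to_mds_solution multiset msc_result → Spec_convert_msc_to_mds_solution multiset msc_result (convert_msc_to_mds_solution multiset msc_result)

-- ===== LEMMAS AND PROOFS =====

-- the bit contributed by one mask, given (the option of) its first matching index
def pvBitOf (n : Nat) : Option Nat → Nat
  | none => 0
  | some j => 1 <<< (n - j - 1)

-- OR of f over a list of masks
def pvOrMap (f : Int → Nat) : List Int → Nat
  | [] => 0
  | x :: R => f x ||| pvOrMap f R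

theorem pvOrMap_zero (R : List Int) : pvOrMap (fun _ => 0) R = 0 := by
  induction R with
  | nil => rfl
  | cons x R ih => simp [pvOrMap, ih]

-- splitting pvOrMap along a 'matched by m' predicate (first step of pvFindIdx)
theorem pvOrMap_split (bj : Nat) (f' : Int → Nat) (p : Int → Prop) [DecidablePred p] (R : List Int) :
    pvOrMap (fun x => if p x then bj else f' x) R
      = (if R.any (fun x => decide (p x)) then bj else 0)
        ||| pvOrMap f' (R.filter (fun x => decide (¬ p x))) := by
  induction R with
  | nil => simp [pvOrMap]
  | cons x R ih =>
    by_cases h : p x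
    · simp only [pvOrMap, List.any_cons, List.filter_cons, h, decide_true, Bool.true_or,
        if_true, not_true, decide_false, ih]
      by_cases h2 : R.any (fun x => decide (p x)) <;>
        simp [h2, ← Nat.or_assoc]
    · simp only [pvOrMap, List.any_cons, List.filter_cons, h, decide_false, Bool.false_or,
        not_false_iff, decide_true, if_true, ih]
      by_cases h2 : R.any (fun x => decide (p x)) <;>
        simp [h2, ← Nat.or_assoc, Nat.or_comm (f' x)]

-- (length of filter = length) ↔ nothing matched; phrased as the scan's guard
theorem pvGuard_iff (p : Int → Prop) [DecidablePred p] (R : List Int) :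
    ((R.filter (fun x => decide (¬ p x))).length ≠ R.length)
      ↔ R.any (fun x => decide (p x)) = true := by
  rw [Ne, List.length_filter_eq_length_iff]
  simp

-- B's scan computes acc OR the fold of each remaining mask's first-match bit
theorem pvScan_eq (n : Nat) (ms : List Int) (j : Nat) (R : List Int) (a : Nat) :
    pvScan n j R (a : Int) ms
      = ((a ||| pvOrMap (fun x => pvBitOf n (pvFindIdx x j ms)) R : Nat) : Int) := by
  induction ms generalizing j R a with
  | nil => simp [pvScan, pvFindIdx, pvBitOf, pvOrMap_zero]
  | cons m ms ih =>
    have hbit : (1 : Int) <<< (n - j - 1) = ((1 <<< (n - j - 1) : Nat) : Int) :=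
      Int.mem_toNat?.mp rfl
    have hsplit := pvOrMap_split (1 <<< (n - j - 1))
      (fun x => pvBitOf n (pvFindIdx x (j + 1) ms)) (fun x => PySem.Int.band x m = x) R
    have hguard := pvGuard_iff (fun x => PySem.Int.band x m = x) R
    simp only [pvScan]
    by_cases hc : (R.filter (fun x => decide (PySem.Int.band x m ≠ x))).length ≠ R.length
    · have hany : R.any (fun x => decide (PySem.Int.band x m = x)) = true := hguard.mp hc
      rw [if_pos hc, hbit, PySem.Int.bor_natCast, ih]
      congr 1
      have : pvOrMap (fun x => pvBitOf n (pvFindIdx x j (m :: ms))) R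
          = pvOrMap (fun x => if PySem.Int.band x m = x then 1 <<< (n - j - 1)
              else pvBitOf n (pvFindIdx x (j + 1) ms)) R := by
        congr 1; funext x; simp only [pvFindIdx]; split_ifs <;> simp [pvBitOf]
      rw [this, hsplit, if_pos hany, Nat.or_assoc]
    · have hany : ¬ R.any (fun x => decide (PySem.Int.band x m = x)) = true := fun h => hc (hguard.mpr h)
      have heq : R.filter (fun x => decide (PySem.Int.band x m ≠ x)) = R := by
        apply List.filter_eq_self.mpr
        intro x hx
        simp only [decide_eq_true_iff]
        intro hpx
        exact hany (List.any_eq_true.mpr ⟨x, hx, by simp [hpx]⟩)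
      rw [if_neg hc, ih]
      congr 1
      have : pvOrMap (fun x => pvBitOf n (pvFindIdx x j (m :: ms))) R
          = pvOrMap (fun x => if PySem.Int.band x m = x then 1 <<< (n - j - 1)
              else pvBitOf n (pvFindIdx x (j + 1) ms)) R := by
        congr 1; funext x; simp only [pvFindIdx]; split_ifs <;> simp [pvBitOf]
      rw [this, hsplit, if_neg hany, heq, Nat.zero_or]

-- A's first loop builds exactly the filterMap of the found indices
theorem pvBuild_eq_filterMap (multiset : List Int) (l : List Int) (acc : List Nat) :
    l.foldl (fun acc x =>
        match pvFindIdx x 0 multiset with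
        | some j => acc ++ [j]
        | none => acc) acc
      = acc ++ l.filterMap (fun x => pvFindIdx x 0 multiset) := by
  induction l generalizing acc with
  | nil => simp
  | cons x l ih =>
    simp only [List.foldl_cons, List.filterMap_cons]
    cases pvFindIdx x 0 multiset <;> simp [ih]

-- the Int OR-fold over bit values is the cast of the Nat OR-fold
theorem pvFold_natCast (n : Nat) (js : List Nat) (m : Nat) :
    js.foldl (fun acc j => PySem.Int.bor acc ((1 : Int) <<< (n - j - 1))) (m : Int)
      = ((js.foldl (fun acc j => acc ||| (1 <<< (n - j - 1))) m : Nat) : Int) := by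
  induction js generalizing m with
  | nil => rfl
  | cons j js ih =>
    have hcast : (1 : Int) <<< (n - j - 1) = ((1 <<< (n - j - 1) : Nat) : Int) :=
      Int.mem_toNat?.mp rfl
    simp only [List.foldl_cons, hcast, PySem.Int.bor_natCast]
    exact ih _

-- the Nat OR-fold is right-commutative, so the sorted list folds equally
theorem pvFold_sorted (n : Nat) (js : List Nat) (m : Nat) :
    (PySem.List.sorted js (fun j => j) false).foldl (fun acc j => acc ||| (1 <<< (n - j - 1))) m
      = js.foldl (fun acc j => acc ||| (1 <<< (n - j - 1))) m := by
  haveI : RightCommutative (fun (acc : Nat) (j : Nat) => acc ||| (1 <<< (n - j - 1))) :=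
    ⟨fun a b c => by
      simp only [Nat.or_assoc]
      rw [Nat.or_comm (1 <<< (n - b - 1))]⟩
  exact (PySem.List.sorted_perm js (fun j => j) false).foldl_eq m

-- the Nat OR-fold over the filterMap of found indices is pvOrMap of pvBitOf
theorem pvFold_filterMap (n : Nat) (multiset : List Int) (l : List Int) (a : Nat) :
    (l.filterMap (fun x => pvFindIdx x 0 multiset)).foldl
        (fun acc j => acc ||| (1 <<< (n - j - 1))) a
      = a ||| pvOrMap (fun x => pvBitOf n (pvFindIdx x 0 multiset)) l := by
  induction l generalizing a with
  | nil => simp [pvOrMap]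
  | cons x l ih =>
    simp only [List.filterMap_cons, pvOrMap]
    cases h : pvFindIdx x 0 multiset with
    | none => rw [ih]; simp [pvBitOf]
    | some j => rw [List.foldl_cons, ih]; simp [pvBitOf, Nat.or_assoc]

-- ===== VERDICT (by name: the statement is the Claim_ definition above) =====
theorem convert_msc_to_mds_solution_spec : Claim_equal_convert_msc_to_mds_solution := by
  intro multiset msc_result _
  show convert_msc_to_mds_solution multiset msc_result
      = convert_msc_to_mds_solution_alt multiset msc_result
  unfold convert_msc_to_mds_solution convert_msc_to_mds_solution_alt
  rw [pvBuild_eq_filterMap, List.nil_append]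
  have h0 : (0 : Int) = ((0 : Nat) : Int) := rfl
  rw [h0, pvFold_natCast, pvFold_sorted, pvFold_filterMap, pvScan_eq]
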